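-- pv_equiv track=rewrite | github.com/xudalin0609/leet-code | CommonDataStructure/findUniqueNumber.py | firstUniqueNumber
-- ===== SOURCE A (Python) =====
-- def firstUniqueNumber(nums, number):
--     nums_dic = {}
--
--     # Write your code here
--     for num in nums:
--         nums_dic[num] = nums_dic.get(num, 0) + 1
--         if num == number:
--             break
--     else:
--         return -1
--
--     for num, count in nums_dic.items():
--         if count == 1:
--             return num
--
--     return -1
-- ===== SOURCE B (Python) =====
-- def firstUniqueNumber(nums, number):
--     try:
--         end = nums.index(number)
--     except ValueError:
--         return -1
--     prefix = nums[:end + 1]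
--     # eliminate duplicates front-to-back: the head is either unique (answer)
--     # or a duplicate, in which case every copy of it is removed and we continue
--     while prefix:
--         head, tail = prefix[0], prefix[1:]
--         if head not in tail:
--             return head
--         prefix = [x for x in tail if x != head]
--     return -1
-- ===== Notes on version B (the rewrite author's own statement) =====
-- stated objective: alternative
-- what changed: B replaces A's ordered count-dictionary (built up to the break, then scanned for the first count-1 key) with an elimination loop and no counting at all: on the inclusive prefix up to number it repeatedly inspects the head, returns it if it does not reoccur in the tail, and otherwise filters every copy of it out of the tail and continues.
import Mathlib
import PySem

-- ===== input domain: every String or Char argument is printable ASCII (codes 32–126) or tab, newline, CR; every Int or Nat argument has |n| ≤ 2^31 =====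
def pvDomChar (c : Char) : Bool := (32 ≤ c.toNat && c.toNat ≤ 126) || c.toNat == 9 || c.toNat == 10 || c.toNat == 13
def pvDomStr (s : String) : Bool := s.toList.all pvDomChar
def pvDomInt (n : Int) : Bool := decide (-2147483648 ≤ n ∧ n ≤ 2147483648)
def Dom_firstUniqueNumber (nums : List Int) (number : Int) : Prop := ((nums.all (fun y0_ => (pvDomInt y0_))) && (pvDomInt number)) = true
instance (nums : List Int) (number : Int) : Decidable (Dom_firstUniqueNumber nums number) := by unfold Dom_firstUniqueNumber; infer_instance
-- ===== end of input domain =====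

-- B trades A's ordered count-dictionary for a count-free elimination loop on the prefix (alternative decomposition, not faster).

-- ===== PORT A =====
-- the for/else loop: counts into the dict and breaks at the first occurrence of number; none = the 'else: return -1' branch
def fuA_loop (number : Int) (d : PySem.Dict Int Int) : List Int → Option (PySem.Dict Int Int)
  | [] => none
  | n :: rest =>
    let d' := d.insert n (d.getD n 0 + 1)
    if n == number then some d' else fuA_loop number d' rest

-- the second loop: first key with count 1, else -1
def fuA_find : List (Int × Int) → Int
  | [] => -1
  | (num, c) :: rest => if c == 1 then num else fuA_find rest

def firstUniqueNumber (nums : List Int) (number : Int) : Int :=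
  match fuA_loop number PySem.Dict.empty nums with
  | none => -1
  | some d => fuA_find d.items

-- ===== PORT B =====
-- the while loop: head unique → return it; otherwise filter out all its copies and continue
def fuB_loop : List Int → Int
  | [] => -1
  | h :: t => if h ∈ t then fuB_loop (t.filter (fun x => x ≠ h)) else h
termination_by p => p.length
decreasing_by
  simp only [List.length_unattach, List.length_cons]
  exact Nat.lt_succ_of_le (le_trans (List.length_filter_le _ _) (by simp))

def firstUniqueNumber_alt (nums : List Int) (number : Int) : Int :=
  match PySem.List.index? nums number with
  | none => -1          -- except ValueError: return -1
  | some stop =>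
    fuB_loop (PySem.List.slice nums (some 0) (some ((stop : Int) + 1)))

-- ===== PRECONDITION & SPEC =====
def Spec_firstUniqueNumber (nums : List Int) (number : Int) (out : Int) : Prop := out = firstUniqueNumber_alt nums number
instance (nums : List Int) (number : Int) (out : Int) : Decidable (Spec_firstUniqueNumber nums number out) := by unfold Spec_firstUniqueNumber; infer_instance

-- ===== CLAIM (what is proved, stated in full; the proofs are below) =====
def Claim_equal_firstUniqueNumber : Prop := ∀ (nums : List Int) (number : Int), Dom_firstUniqueNumber nums number → Spec_firstUniqueNumber nums number (firstUniqueNumber nums number)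

-- ===== LEMMAS AND PROOFS =====

-- A's break loop is: locate number, then fold the counting step over the inclusive prefix
theorem fuA_loop_eq (number : Int) (nums : List Int) : ∀ d : PySem.Dict Int Int,
    fuA_loop number d nums =
      match PySem.List.index? nums number with
      | none => none
      | some i => some ((nums.take (i + 1)).foldl (fun d x => d.insert x (d.getD x 0 + 1)) d) := by
  induction nums with
  | nil => intro d; simp [fuA_loop, PySem.List.index?]
  | cons n rest ih =>
    intro d
    by_cases h : n = number
    · subst h
      rw [PySem.List.index?_cons_self]
      simp [fuA_loop]
    · rw [PySem.List.index?_cons_of_ne rest h]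
      simp only [fuA_loop, beq_iff_eq, if_neg h]
      rw [ih]
      cases hidx : PySem.List.index? rest number with
      | none => simp
      | some i => simp [List.take_succ_cons, List.foldl_cons]

-- the dict scan over (k, count) pairs is find? on the keys
theorem fuA_find_map (c : Int → Int) : ∀ l : List Int,
    fuA_find (l.map (fun k => (k, c k))) = (l.find? (fun k => c k == 1)).getD (-1) := by
  intro l
  induction l with
  | nil => simp [fuA_find]
  | cons x t ih =>
    cases hbx : ((c x) == (1 : Int)) <;>
      simp [fuA_find, List.find?, hbx, ih]

-- find? through Python-set construction: dropping later duplicates never changes the first hit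
theorem find?_foldl_add (pr : Int → Bool) : ∀ (p : List Int) (s : PySem.Set Int),
    List.find? pr (p.foldl PySem.Set.add s) = (List.find? pr s).orElse (fun _ => List.find? pr p) := by
  intro p
  induction p with
  | nil => intro s; cases h : List.find? pr s <;> simp [Option.orElse, h]
  | cons x t ih =>
    intro s
    rw [List.foldl_cons, ih]
    unfold PySem.Set.add
    by_cases hc : PySem.Set.contains s x
    · rw [if_pos hc]
      have hx : x ∈ s := by
        simpa [PySem.Set.contains] using hc
      cases hs : List.find? pr s with
      | some y => simp [Option.orElse]
      | none =>
        have hpx : pr x = false := by simpa using List.find?_eq_none.mp hs x hx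
        simp [Option.orElse, List.find?, hpx]
    · rw [if_neg hc]
      rw [List.find?_append]
      cases hs : List.find? pr s with
      | some y => simp [Option.orElse]
      | none =>
        cases hpx : pr x <;> simp [Option.orElse, List.find?, hpx]

theorem find?_ofList (pr : Int → Bool) (p : List Int) :
    List.find? pr (PySem.Set.ofList p) = List.find? pr p := by
  rw [PySem.Set.ofList_eq_foldl, find?_foldl_add]
  simp [Option.orElse]

-- find? through a duplicate-eliminating filter: removing the members on which the
-- predicate is false, while the predicates agree on the survivors, keeps the first hit
theorem find?_filter_congr (h : Int) (pr pr' : Int → Bool)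
    (hfalse : pr h = false) (hagree : ∀ x, x ≠ h → pr x = pr' x) :
    ∀ l : List Int, List.find? pr l = List.find? pr' (l.filter (fun x => x ≠ h)) := by
  intro l
  induction l with
  | nil => simp
  | cons x t ih =>
    by_cases hx : x = h
    · subst hx
      simp [List.find?, hfalse, ih]
    · rw [List.filter_cons_of_pos (by simpa using hx)]
      have hpe : pr' x = pr x := (hagree x hx).symm
      cases hpx : pr x
      · simp [hpx, hpe, ih]
      · simp [hpx, hpe]

-- B's elimination loop computes the first element occurring exactly once
theorem fuB_loop_eq_aux : ∀ (n : Nat) (p : List Int), p.length ≤ n →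
    fuB_loop p = (p.find? (fun x => ((p.count x : Int)) == 1)).getD (-1) := by
  intro n
  induction n with
  | zero =>
    intro p hp
    have hnil : p = [] := List.eq_nil_of_length_eq_zero (Nat.le_zero.mp hp)
    simp [hnil, fuB_loop]
  | succ n ih =>
    intro p hp
    match p with
    | [] => simp [fuB_loop]
    | h :: t =>
      by_cases hmem : h ∈ t
      · have hge : 1 ≤ t.count h := List.one_le_count_iff.mpr hmem
        have hfalse : ((((h :: t).count h : Nat) : Int) == (1 : Int)) = false := by
          simp only [List.count_cons_self, beq_eq_false_iff_ne, ne_eq]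
          intro hc
          have : t.count h + 1 = 1 := by exact_mod_cast hc
          omega
        have hagree : ∀ x, x ≠ h →
            ((((h :: t).count x : Nat) : Int) == (1 : Int)) =
            ((((t.filter (fun y => y ≠ h)).count x : Nat) : Int) == (1 : Int)) := by
          intro x hx
          have h1 : (h :: t).count x = t.count x := by
            simp [show ¬h = x from fun hc => hx hc.symm]
          have h2 : (t.filter (fun y => y ≠ h)).count x = t.count x := by
            rw [List.count_filter]
            simp [hx]
          rw [h1, h2]
        have hrec := ih (t.filter (fun x => x ≠ h))
          (le_trans (List.length_filter_le _ _) (Nat.le_of_succ_le_succ hp))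
        rw [fuB_loop, if_pos hmem, hrec]
        simp only [List.find?_cons, hfalse]
        rw [find?_filter_congr h _ _ hfalse hagree t]
      · have hcnt : t.count h = 0 := List.count_eq_zero.mpr hmem
        have htrue : ((((h :: t).count h : Nat) : Int) == (1 : Int)) = true := by
          simp [List.count_cons_self, hcnt]
        rw [fuB_loop, if_neg hmem]
        simp only [List.find?_cons, htrue]
        rfl

theorem fuB_loop_eq (p : List Int) :
    fuB_loop p = (p.find? (fun x => ((p.count x : Int)) == 1)).getD (-1) :=
  fuB_loop_eq_aux p.length p le_rfl

-- ===== VERDICT (by name: the statement is the Claim_ definition above) =====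
theorem firstUniqueNumber_spec : Claim_equal_firstUniqueNumber := by
  intro nums number _
  unfold Spec_firstUniqueNumber firstUniqueNumber firstUniqueNumber_alt
  rw [fuA_loop_eq]
  cases hidx : PySem.List.index? nums number with
  | none => simp
  | some i =>
    simp only
    have hslice : PySem.List.slice nums (some 0) (some ((i : Int) + 1)) = nums.take (i + 1) := by
      have : ((i : Int) + 1) = ((i + 1 : Nat) : Int) := by push_cast; ring
      rw [this, PySem.List.slice_zero_start, PySem.List.slice_to_natCast]
    rw [hslice]
    set p := nums.take (i + 1) with hp
    rw [PySem.Dict.foldl_insert_getD_add_one_eq_counter, PySem.Dict.items_counter,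
        fuA_find_map, find?_ofList, fuB_loop_eq]
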